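-- pv_equiv track=rewrite | github.com/Abdelmathin/computorv2 | generator/generator.py | function_implementation
-- ===== SOURCE A (Python) =====
-- def function_implementation(namespace, prototype):
-- 	for k in " \r\n\t\v\f;":
-- 		prototype = prototype.replace(k, " ").strip()
-- 	while ("  " in prototype):
-- 		prototype = prototype.replace("  ", " ")
-- 	i = prototype.index(" ")
-- 	prototype = prototype[:i] + " " + namespace + "::" + prototype[i:].strip()
-- 	return (prototype)
-- ===== SOURCE B (Python) =====
-- SEPS = " \r\n\t\v\f;"
--
-- def function_implementation(namespace, prototype):
--     # one-pass tokenizer: split prototype on separator characters into non-empty tokens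
--     tokens = []
--     cur = ""
--     for c in prototype:
--         if c in SEPS:
--             if cur:
--                 tokens.append(cur)
--             cur = ""
--         else:
--             cur += c
--     if cur:
--         tokens.append(cur)
--     if len(tokens) < 2:
--         raise ValueError("substring not found")
--     return tokens[0] + " " + namespace + "::" + " ".join(tokens[1:])
-- ===== Notes on version B (the rewrite author's own statement) =====
-- stated objective: faster
-- what changed: replaces A's seven replace/strip passes plus the quadratic 'while " " in prototype' collapse and index/slice surgery by a single one-pass tokenizer that splits on the separator characters and rejoins tokens with namespace:: inserted after the first token
import Mathlib
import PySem

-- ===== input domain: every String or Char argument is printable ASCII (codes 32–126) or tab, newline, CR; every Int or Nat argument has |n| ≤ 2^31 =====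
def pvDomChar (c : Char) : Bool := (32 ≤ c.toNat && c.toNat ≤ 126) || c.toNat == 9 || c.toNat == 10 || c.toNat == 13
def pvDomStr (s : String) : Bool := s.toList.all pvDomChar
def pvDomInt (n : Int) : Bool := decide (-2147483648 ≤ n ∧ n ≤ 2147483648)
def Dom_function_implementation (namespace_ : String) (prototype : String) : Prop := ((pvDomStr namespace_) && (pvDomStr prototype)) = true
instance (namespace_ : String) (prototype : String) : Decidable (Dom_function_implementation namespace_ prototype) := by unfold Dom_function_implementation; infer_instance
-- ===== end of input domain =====

-- B replaces A's seven replace/strip passes and repeated double-space collapse by a single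
-- tokenizing pass; equal output proved wherever A returns (Pre_ excludes A's ValueError inputs).

-- ===== PORT A =====
-- the separator characters of the Python literal " \r\n\t\v\f;"
def pvSeps : List Char := [' ', '\r', '\n', '\t', '\x0B', '\x0C', ';']

-- structural form of prototype.replace("  ", " ") (one pass), needed for termination of the while loop below
def pvRs : List Char → List Char
  | ' ' :: ' ' :: t => ' ' :: pvRs t
  | c :: t => c :: pvRs t
  | [] => []

theorem pvRs_nil : pvRs [] = [] := rfl
theorem pvRs_pair (t : List Char) : pvRs (' ' :: ' ' :: t) = ' ' :: pvRs t := rfl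
theorem pvRs_one (c : Char) : pvRs [c] = [c] := by rw [pvRs.eq_def]; split <;> simp_all [pvRs_nil]
theorem pvRs_cons₁ (c : Char) (t : List Char) (h : c ≠ ' ') : pvRs (c :: t) = c :: pvRs t := by
  rw [pvRs.eq_def]; split <;> simp_all
theorem pvRs_cons₂ (c d : Char) (t : List Char) (h : d ≠ ' ') : pvRs (c :: d :: t) = c :: pvRs (d :: t) := by
  rw [pvRs.eq_def]; split <;> simp_all

theorem pvGo_pair (fuel : Nat) : ∀ (l acc : List Char), l.length ≤ fuel →
    PySem.Chars.replace.go [' ', ' '] [' '] fuel l acc = acc.reverse ++ pvRs l := by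
  induction fuel with
  | zero =>
    intro l acc h
    have : l = [] := by cases l <;> simp_all
    subst this; simp [PySem.Chars.replace.go, pvRs]
  | succ n ih =>
    intro l acc h
    match l with
    | [] => simp [PySem.Chars.replace.go, pvRs]
    | [c] =>
      rw [PySem.Chars.replace.go]
      have hp : List.isPrefixOf [' ', ' '] [c] = false := by simp [List.isPrefixOf]
      simp only [hp, Bool.false_eq_true, if_false]
      rw [ih [] (c :: acc) (by simp)]
      simp [pvRs_one, pvRs_nil]
    | c :: d :: t =>
      rw [PySem.Chars.replace.go]
      by_cases hc : c = ' '
      · by_cases hd : d = ' '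
        · subst hc; subst hd
          have hp : List.isPrefixOf [' ', ' '] (' ' :: ' ' :: t) = true := by simp [List.isPrefixOf]
          simp only [hp, if_true]
          rw [show List.drop [' ',' '].length (' '::' '::t) = t from rfl]
          rw [ih t _ (by simp at h ⊢; omega)]
          simp [pvRs_pair]
        · have hp : List.isPrefixOf [' ', ' '] (c :: d :: t) = false := by simp [List.isPrefixOf]; tauto
          simp only [hp, Bool.false_eq_true, if_false]
          rw [ih (d :: t) (c :: acc) (by simp at h ⊢; omega)]
          simp [pvRs_cons₂ c d t hd]
      · have hp : List.isPrefixOf [' ', ' '] (c :: d :: t) = false := by simp [List.isPrefixOf]; tauto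
        simp only [hp, Bool.false_eq_true, if_false]
        rw [ih (d :: t) (c :: acc) (by simp at h ⊢; omega)]
        simp [pvRs_cons₁ c _ hc]

theorem pvReplace_pair (p : List Char) : PySem.Chars.replace p [' ', ' '] [' '] = pvRs p := by
  rw [PySem.Chars.replace]
  rw [if_neg (by simp)]
  simpa using pvGo_pair p.length p [] le_rfl

theorem pvRs_cons (c : Char) (t : List Char) (h : ¬(c = ' ' ∧ ∃ t', t = ' ' :: t')) :
    pvRs (c :: t) = c :: pvRs t := by
  by_cases hc : c = ' '
  · cases t with
    | nil => subst hc; exact pvRs_one _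
    | cons d t' =>
      have hd : d ≠ ' ' := by rintro rfl; exact h ⟨hc, t', rfl⟩
      exact pvRs_cons₂ c d t' hd
  · exact pvRs_cons₁ c t hc

theorem pvRs_length_le (p : List Char) : (pvRs p).length ≤ p.length := by
  induction p using pvRs.induct with
  | case1 t ih => simp [pvRs_pair]; omega
  | case2 c t hne ih =>
    rw [pvRs_cons c t (by rintro ⟨rfl, t', rfl⟩; exact hne t' rfl rfl)]
    simp; omega
  | case3 => simp [pvRs_nil]

theorem pvRs_length_lt (p : List Char) (h : PySem.Chars.isIn [' ', ' '] p = true) :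
    (pvRs p).length < p.length := by
  rw [PySem.Chars.isIn_iff_infix] at h
  induction p using pvRs.induct with
  | case1 t ih =>
    have := pvRs_length_le t; simp [pvRs_pair]; omega
  | case2 c t hne ih =>
    rw [pvRs_cons c t (by rintro ⟨rfl, t', rfl⟩; exact hne t' rfl rfl)]
    rcases List.infix_cons_iff.mp h with hp | hi
    · exfalso
      cases t with
      | nil => obtain ⟨r, hr⟩ := hp; simp at hr
      | cons d t' =>
        obtain ⟨r, hr⟩ := hp; simp at hr
        exact hne t' hr.1.symm (by rw [hr.2.1])
    · have := ih hi; simp; omega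
  | case3 => simp at h

-- while ("  " in prototype): prototype = prototype.replace("  ", " ")
def pvCollapse (p : List Char) : List Char :=
  if h : PySem.Chars.isIn [' ', ' '] p = true then pvCollapse (PySem.Chars.replace p [' ', ' '] [' ']) else p
termination_by p.length
decreasing_by rw [pvReplace_pair]; exact pvRs_length_lt p h

def function_implementation (namespace_ : String) (prototype : String) : String :=
  -- for k in " \r\n\t\v\f;": prototype = prototype.replace(k, " ").strip()
  let p0 := pvSeps.foldl (fun p k => PySem.Chars.strip (PySem.Chars.replace p [k] [' '])) prototype.toList
  -- while ("  " in prototype): prototype = prototype.replace("  ", " ")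
  let p := pvCollapse p0
  -- i = prototype.index(" ")  (raises ValueError when there is no space: excluded by Pre_)
  let i := PySem.Chars.find p [' ']
  if i = -1 then ""
  else String.ofList (PySem.List.slice p none (some i) ++ [' '] ++ namespace_.toList ++ [':', ':']
        ++ PySem.Chars.strip (PySem.List.slice p (some i) none))

-- ===== PORT B =====
-- one step of Source B's tokenizing loop
def pvStep (st : List (List Char) × List Char) (c : Char) : List (List Char) × List Char :=
  if c ∈ pvSeps then (if st.2 ≠ [] then st.1 ++ [st.2] else st.1, []) else (st.1, st.2 ++ [c])

def function_implementation_alt (namespace_ : String) (prototype : String) : String :=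
  let st := prototype.toList.foldl pvStep ([], [])
  let tokens := if st.2 ≠ [] then st.1 ++ [st.2] else st.1
  match tokens with
  | t0 :: t1 :: ts =>
      -- tokens[0] + " " + namespace + "::" + " ".join(tokens[1:])
      String.ofList (t0 ++ ' ' :: (namespace_.toList ++ ':' :: ':' :: PySem.Chars.join [' '] (t1 :: ts)))
  | _ => ""  -- Python raises ValueError here (fewer than two tokens): excluded by Pre_

-- ===== PRECONDITION & SPEC =====
-- Pre_ excludes exactly the inputs with fewer than two separator-delimited tokens, on which
-- Python A raises ValueError at prototype.index(" ") (and B raises ValueError as well).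
def Pre_function_implementation (namespace_ : String) (prototype : String) : Prop :=
  (((prototype.toList.dropWhile (fun c => decide (c ∈ pvSeps))).dropWhile
      (fun c => decide (c ∉ pvSeps))).any (fun c => decide (c ∉ pvSeps))) = true
instance (namespace_ : String) (prototype : String) : Decidable (Pre_function_implementation namespace_ prototype) := by
  unfold Pre_function_implementation; infer_instance

def pvWitness_function_implementation : String × String := ("matrix", "int det(mat m)")

def Spec_function_implementation (namespace_ : String) (prototype : String) (out : String) : Prop :=
  out = function_implementation_alt namespace_ prototype
instance (namespace_ : String) (prototype : String) (out : String) : Decidable (Spec_function_implementation namespace_ prototype out) := by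
  unfold Spec_function_implementation; infer_instance

-- ===== CLAIM (what is proved, stated in full; the proofs are below) =====
def Claim_equal_function_implementation : Prop := ∀ (namespace_ : String) (prototype : String), Dom_function_implementation namespace_ prototype → Pre_function_implementation namespace_ prototype → Spec_function_implementation namespace_ prototype (function_implementation namespace_ prototype)

-- ===== LEMMAS AND PROOFS =====

-- map each listed separator character to a space, keep every other character
def pvM (c : Char) : Char := if c ∈ pvSeps then ' ' else c
-- a single-character replace k -> ' '
def pvMk (k c : Char) : Char := if c = k then ' ' else c
-- non-space test
def pvNS (c : Char) : Bool := !(c == ' ')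

-- maximal non-space runs ("words") of a string over the mapped alphabet
def pvW : List Char → List (List Char)
  | [] => []
  | c :: t => if c = ' ' then pvW t else (c :: t.takeWhile pvNS) :: pvW (t.dropWhile pvNS)
termination_by l => l.length
decreasing_by
  · simp
  · have := List.length_dropWhile_le pvNS t; simp; omega

-- structural one-pass collapse of space runs
def pvNC : List Char → List Char
  | [] => []
  | c :: t => if c = ' ' then ' ' :: pvNC (t.dropWhile (· == ' ')) else c :: pvNC t
termination_by l => l.length
decreasing_by
  · have := List.length_dropWhile_le (fun c => c == ' ') t; simp; omega
  · simp

theorem pvGo_one (k : Char) (fuel : Nat) : ∀ (l acc : List Char), l.length ≤ fuel →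
    PySem.Chars.replace.go [k] [' '] fuel l acc = acc.reverse ++ l.map (pvMk k) := by
  induction fuel with
  | zero =>
    intro l acc h
    have : l = [] := by cases l <;> simp_all
    subst this; simp [PySem.Chars.replace.go]
  | succ n ih =>
    intro l acc h
    match l with
    | [] => simp [PySem.Chars.replace.go]
    | c :: t =>
      rw [PySem.Chars.replace.go]
      by_cases hc : c = k
      · have hp : List.isPrefixOf [k] (c :: t) = true := by simp [List.isPrefixOf, hc]
        simp only [hp, if_true]
        rw [show List.drop [k].length (c :: t) = t from rfl]
        rw [ih t _ (by simp at h ⊢; omega)]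
        simp [pvMk, hc]
      · have hp : List.isPrefixOf [k] (c :: t) = false := by simp [List.isPrefixOf]; tauto
        simp only [hp, Bool.false_eq_true, if_false]
        rw [ih t (c :: acc) (by simp at h ⊢; omega)]
        simp [pvMk, hc]

theorem pvReplace_one (p : List Char) (k : Char) :
    PySem.Chars.replace p [k] [' '] = p.map (pvMk k) := by
  rw [PySem.Chars.replace]
  rw [if_neg (by simp)]
  simpa using pvGo_one k p.length p [] le_rfl

theorem pvNC_eq_self (v : List Char) (h : ¬ ([' ', ' '] <:+: v)) : pvNC v = v := by
  induction v with
  | nil => simp [pvNC]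
  | cons c t ih =>
    have hni : ¬ ([' ', ' '] <:+: t) := fun hi => h (List.infix_cons_iff.mpr (Or.inr hi))
    by_cases hc : c = ' '
    · subst hc
      have hdt : t.dropWhile (· == ' ') = t := by
        cases t with
        | nil => rfl
        | cons d t' =>
          have hd : d ≠ ' ' := by
            rintro rfl; exact h (List.infix_cons_iff.mpr (Or.inl ⟨t', rfl⟩))
          simp [List.dropWhile_cons, hd]
      rw [pvNC]; simp [hdt, ih hni]
    · rw [pvNC]; simp [if_neg hc, ih hni]

theorem pvNC_pvRs (v : List Char) :
    pvNC (pvRs v) = pvNC v ∧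
    pvNC ((pvRs v).dropWhile (· == ' ')) = pvNC (v.dropWhile (· == ' ')) := by
  induction v using pvRs.induct with
  | case3 => simp [pvRs_nil]
  | case1 t ih =>
    constructor
    · rw [pvRs_pair, pvNC, pvNC]
      rw [show ((' ' :: t).dropWhile (· == ' ')) = t.dropWhile (· == ' ') by simp]
      simp [ih.2]
    · rw [pvRs_pair]
      rw [show ((' ' :: pvRs t).dropWhile (· == ' ')) = (pvRs t).dropWhile (· == ' ') by simp [List.dropWhile_cons]]
      rw [show ((' ' :: ' ' :: t).dropWhile (· == ' ')) = t.dropWhile (· == ' ') by simp [List.dropWhile_cons]]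
      exact ih.2
  | case2 c t hne ih =>
    have hcase : ¬(c = ' ' ∧ ∃ t', t = ' ' :: t') := by
      rintro ⟨rfl, t', rfl⟩; exact hne t' rfl rfl
    rw [pvRs_cons c t hcase]
    by_cases hc : c = ' '
    · subst hc
      constructor
      · rw [pvNC, pvNC]
        simp [ih.2]
      · rw [show ((' ' :: pvRs t).dropWhile (· == ' ')) = (pvRs t).dropWhile (· == ' ') by simp [List.dropWhile_cons]]
        rw [show ((' ' :: t).dropWhile (· == ' ')) = t.dropWhile (· == ' ') by simp [List.dropWhile_cons]]
        exact ih.2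
    · constructor
      · rw [pvNC, pvNC]
        simp [if_neg hc, ih.1]
      · rw [show ((c :: pvRs t).dropWhile (· == ' ')) = c :: pvRs t by simp [List.dropWhile_cons, hc]]
        rw [show ((c :: t).dropWhile (· == ' ')) = c :: t by simp [List.dropWhile_cons, hc]]
        rw [pvNC, pvNC]
        simp only [if_neg hc, ih.1]

theorem pvCollapse_eq_pvNC (p : List Char) : pvCollapse p = pvNC p := by
  induction p using pvCollapse.induct with
  | case1 p h ih =>
    rw [pvCollapse, dif_pos h, ih, pvReplace_pair]
    exact (pvNC_pvRs p).1
  | case2 p h =>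
    rw [pvCollapse, dif_neg h]
    refine (pvNC_eq_self p ?_).symm
    rw [Bool.not_eq_true] at h
    rwa [PySem.Chars.isIn_eq_false_iff] at h

theorem pvLstrip_append (a y : List Char) (h : ∀ c ∈ a, PySem.Chars.isspace c = true) :
    PySem.Chars.lstrip (a ++ y) = PySem.Chars.lstrip y := by
  unfold PySem.Chars.lstrip
  rw [List.dropWhile_append]
  rw [if_pos (by simp [List.isEmpty_iff, List.dropWhile_eq_nil_iff]; exact h)]

theorem pvRstrip_append (y b : List Char) (h : ∀ c ∈ b, PySem.Chars.isspace c = true) :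
    PySem.Chars.rstrip (y ++ b) = PySem.Chars.rstrip y := by
  unfold PySem.Chars.rstrip
  rw [List.reverse_append, List.dropWhile_append]
  rw [if_pos (by simp [List.isEmpty_iff, List.dropWhile_eq_nil_iff]; intro c hc; exact h c hc)]

theorem pvStrip_append_left (a y : List Char) (h : ∀ c ∈ a, PySem.Chars.isspace c = true) :
    PySem.Chars.strip (a ++ y) = PySem.Chars.strip y := by
  unfold PySem.Chars.strip
  rw [pvLstrip_append a y h]

theorem pvStrip_append_right (y b : List Char) (h : ∀ c ∈ b, PySem.Chars.isspace c = true) :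
    PySem.Chars.strip (y ++ b) = PySem.Chars.strip y := by
  unfold PySem.Chars.strip PySem.Chars.lstrip
  rw [List.dropWhile_append]
  by_cases he : (List.dropWhile PySem.Chars.isspace y).isEmpty = true
  · rw [if_pos he]
    have hb : List.dropWhile PySem.Chars.isspace b = [] := List.dropWhile_eq_nil_iff.mpr h
    rw [hb]
    simp only [List.isEmpty_iff, List.dropWhile_eq_nil_iff] at he
    rw [List.dropWhile_eq_nil_iff.mpr he]
  · rw [if_neg he]
    exact pvRstrip_append _ b h

theorem pvStrip_decomp (q : List Char) : ∃ a b : List Char,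
    (∀ c ∈ a, PySem.Chars.isspace c = true) ∧ (∀ c ∈ b, PySem.Chars.isspace c = true) ∧
    q = a ++ PySem.Chars.strip q ++ b := by
  refine ⟨List.takeWhile PySem.Chars.isspace q,
         (List.takeWhile PySem.Chars.isspace (PySem.Chars.lstrip q).reverse).reverse,
         fun c hc => List.mem_takeWhile_imp hc, fun c hc => List.mem_takeWhile_imp (List.mem_reverse.mp hc), ?_⟩
  unfold PySem.Chars.strip PySem.Chars.rstrip PySem.Chars.lstrip
  conv_lhs => rw [← List.takeWhile_append_dropWhile (p := PySem.Chars.isspace) (l := q)]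
  rw [List.append_assoc]
  congr 1
  conv_lhs => rw [show List.dropWhile PySem.Chars.isspace q = PySem.Chars.lstrip q from rfl]
  conv_lhs => rw [← List.reverse_reverse (PySem.Chars.lstrip q),
    ← List.takeWhile_append_dropWhile (p := PySem.Chars.isspace) (l := (PySem.Chars.lstrip q).reverse)]
  rw [List.reverse_append]
  rfl

theorem pvStrip_map_strip (f : Char → Char)
    (hf : ∀ c, PySem.Chars.isspace c = true → PySem.Chars.isspace (f c) = true) (q : List Char) :
    PySem.Chars.strip ((PySem.Chars.strip q).map f) = PySem.Chars.strip (q.map f) := by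
  obtain ⟨a, b, ha, hb, hq⟩ := pvStrip_decomp q
  conv_rhs => rw [hq]
  rw [List.map_append, List.map_append]
  rw [pvStrip_append_right _ _ (by intro c hc; obtain ⟨x, hx, rfl⟩ := List.mem_map.mp hc; exact hf x (hb x hx))]
  rw [pvStrip_append_left _ _ (by intro c hc; obtain ⟨x, hx, rfl⟩ := List.mem_map.mp hc; exact hf x (ha x hx))]

theorem pvMk_ws (k : Char) : ∀ c, PySem.Chars.isspace c = true → PySem.Chars.isspace (pvMk k c) = true := by
  intro c hc
  unfold pvMk
  split
  · decide
  · exact hc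

theorem pvComb (f g : Char → Char)
    (hf : ∀ c, PySem.Chars.isspace c = true → PySem.Chars.isspace (f c) = true) (q : List Char) :
    PySem.Chars.strip ((PySem.Chars.strip (q.map g)).map f) = PySem.Chars.strip (q.map (f ∘ g)) := by
  rw [pvStrip_map_strip f hf, List.map_map]

theorem pvM_comp (c : Char) :
    pvMk ';' (pvMk '\x0C' (pvMk '\x0B' (pvMk '\t' (pvMk '\n' (pvMk '\r' (pvMk ' ' c)))))) = pvM c := by
  by_cases h : c ∈ pvSeps
  · simp only [pvSeps, List.mem_cons, List.mem_singleton, List.not_mem_nil, or_false] at h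
    rcases h with rfl | rfl | rfl | rfl | rfl | rfl | rfl <;> rfl
  · have hM : pvM c = c := by unfold pvM; rw [if_neg h]
    simp only [pvSeps, List.mem_cons, List.not_mem_nil, or_false, not_or] at h
    obtain ⟨h1, h2, h3, h4, h5, h6, h7⟩ := h
    unfold pvMk
    rw [hM, if_neg h1, if_neg h2, if_neg h3, if_neg h4, if_neg h5, if_neg h6, if_neg h7]

theorem pvFold_eq_strip_map (l : List Char) :
    pvSeps.foldl (fun p k => PySem.Chars.strip (PySem.Chars.replace p [k] [' '])) l
      = PySem.Chars.strip (l.map pvM) := by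
  simp only [pvSeps, List.foldl_cons, List.foldl_nil]
  simp only [pvReplace_one]
  rw [pvComb (pvMk '\r') _ (pvMk_ws '\r')]
  rw [pvComb (pvMk '\n') _ (pvMk_ws '\n')]
  rw [pvComb (pvMk '\t') _ (pvMk_ws '\t')]
  rw [pvComb (pvMk '\x0B') _ (pvMk_ws '\x0B')]
  rw [pvComb (pvMk '\x0C') _ (pvMk_ws '\x0C')]
  rw [pvComb (pvMk ';') _ (pvMk_ws ';')]
  refine congrArg PySem.Chars.strip ?_
  refine List.map_congr_left (fun c _ => ?_)
  simpa [Function.comp] using pvM_comp c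

-- ---------- generic small facts ----------

theorem pvCharEq_of_toNat {a b : Char} (h : a.toNat = b.toNat) : a = b :=
  Char.ext (UInt32.toNat_inj.mp h)

theorem pvDropWhile_congr {p q : Char → Bool} : ∀ (l : List Char), (∀ c ∈ l, p c = q c) →
    l.dropWhile p = l.dropWhile q
  | [], _ => rfl
  | c :: t, h => by
    have hc := h c (by simp)
    by_cases hp : p c = true
    · rw [List.dropWhile_cons, List.dropWhile_cons, hp, ← hc, hp]
      exact pvDropWhile_congr t (fun x hx => h x (by simp [hx]))
    · rw [List.dropWhile_cons, List.dropWhile_cons]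
      rw [Bool.not_eq_true] at hp
      rw [hp, ← hc, hp]
      simp

theorem pvHead?_dropWhile {p : Char → Bool} : ∀ (l : List Char) (c : Char),
    (l.dropWhile p).head? = some c → p c = false
  | [], c, h => by simp at h
  | d :: t, c, h => by
    by_cases hp : p d = true
    · rw [List.dropWhile_cons, if_pos hp] at h
      exact pvHead?_dropWhile t c h
    · rw [List.dropWhile_cons, if_neg hp] at h
      simp at h
      rw [← h]
      exact Bool.not_eq_true _ |>.mp hp

theorem pvGetLast?_allsp : ∀ (x : List Char), x ≠ [] → (∀ c ∈ x, c = ' ') → x.getLast? = some ' '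
  | [], h, _ => absurd rfl h
  | [c], _, ha => by simp [ha c (by simp)]
  | c :: d :: t, _, ha => by
    rw [List.getLast?_cons_cons]
    exact pvGetLast?_allsp (d :: t) (by simp) (fun x hx => ha x (List.mem_cons_of_mem c hx))

theorem pvGetLast?_append_right (y x : List Char) (h : x ≠ []) : (y ++ x).getLast? = x.getLast? := by
  rw [List.getLast?_append]
  cases hx : x.getLast? with
  | none => exact absurd (List.getLast?_eq_none_iff.mp hx) h
  | some c => rfl

-- ---------- the mapped alphabet: Dom characters and isspace ----------

theorem pvSP_char (x : Char) (hd : pvDomChar x = true) :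
    PySem.Chars.isspace (pvM x) = (pvM x == ' ') := by
  by_cases h : x ∈ pvSeps
  · unfold pvM; rw [if_pos h]; decide
  · unfold pvM; rw [if_neg h]
    simp only [pvSeps, List.mem_cons, List.not_mem_nil, or_false, not_or] at h
    obtain ⟨h1, h2, h3, h4, h5, h6, h7⟩ := h
    have e1 : x.toNat ≠ 32 := fun he => h1 (pvCharEq_of_toNat he)
    have e2 : x.toNat ≠ 13 := fun he => h2 (pvCharEq_of_toNat he)
    have e3 : x.toNat ≠ 10 := fun he => h3 (pvCharEq_of_toNat he)
    have e4 : x.toNat ≠ 9 := fun he => h4 (pvCharEq_of_toNat he)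
    have e5 : x.toNat ≠ 11 := fun he => h5 (pvCharEq_of_toNat he)
    have e6 : x.toNat ≠ 12 := fun he => h6 (pvCharEq_of_toNat he)
    have hx : (x == ' ') = false := by simp [h1]
    rw [hx]
    simp only [pvDomChar, Bool.or_eq_true, Bool.and_eq_true, decide_eq_true_eq, beq_iff_eq] at hd
    unfold PySem.Chars.isspace
    simp only [Bool.or_eq_false_iff, Bool.and_eq_false_iff, decide_eq_false_iff_not]
    omega

theorem pvSP_map (l : List Char) (h : ∀ c ∈ l, pvDomChar c = true) :
    ∀ c ∈ l.map pvM, PySem.Chars.isspace c = (c == ' ') := by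
  intro c hc
  obtain ⟨x, hx, rfl⟩ := List.mem_map.mp hc
  exact pvSP_char x (h x hx)

-- under space-only whitespace, strip is the space trim
theorem pvStrip_sp (v : List Char) (hsp : ∀ c ∈ v, PySem.Chars.isspace c = (c == ' ')) :
    PySem.Chars.strip v =
      (((v.dropWhile (· == ' ')).reverse.dropWhile (· == ' '))).reverse := by
  unfold PySem.Chars.strip PySem.Chars.rstrip PySem.Chars.lstrip
  rw [pvDropWhile_congr v hsp]
  congr 1
  refine pvDropWhile_congr _ (fun c hc => ?_)
  refine hsp c ?_
  rw [List.mem_reverse] at hc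
  exact (List.dropWhile_sublist _).mem hc

-- ---------- words ----------

theorem pvW_nil : pvW [] = [] := by rw [pvW]

theorem pvW_cons_sp (t : List Char) : pvW (' ' :: t) = pvW t := by rw [pvW]; simp

theorem pvW_cons (c : Char) (t : List Char) (hc : c ≠ ' ') :
    pvW (c :: t) = (c :: t.takeWhile pvNS) :: pvW (t.dropWhile pvNS) := by
  rw [pvW]; simp [hc]

theorem pvW_drop (v : List Char) : pvW (v.dropWhile (· == ' ')) = pvW v := by
  induction v with
  | nil => rfl
  | cons c t ih =>
    by_cases hc : c = ' '
    · subst hc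
      rw [List.dropWhile_cons]
      simp only [beq_self_eq_true, if_true]
      rw [ih, pvW_cons_sp]
    · rw [List.dropWhile_cons, if_neg (by simp [hc])]

theorem pvW_allsp : ∀ (ts : List Char), (∀ c ∈ ts, c = ' ') → pvW ts = []
  | [], _ => pvW_nil
  | c :: t, h => by
    rw [h c (by simp), pvW_cons_sp]
    exact pvW_allsp t (fun x hx => h x (List.mem_cons_of_mem c hx))

theorem pvTakeWhile_append_fail (ts : List Char) (hts : ∀ c ∈ ts, pvNS c = false) :
    ∀ t : List Char, (t ++ ts).takeWhile pvNS = t.takeWhile pvNS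
  | [] => by
    simp only [List.nil_append, List.takeWhile_nil]
    cases ts with
    | nil => rfl
    | cons a b => rw [List.takeWhile_cons, hts a (by simp)]; simp
  | c :: t => by
    rw [List.cons_append, List.takeWhile_cons, List.takeWhile_cons]
    cases hp : pvNS c
    · rfl
    · rw [pvTakeWhile_append_fail ts hts t]

theorem pvDropWhile_append_fail (ts : List Char) (hts : ∀ c ∈ ts, pvNS c = false) :
    ∀ t : List Char, (t ++ ts).dropWhile pvNS = t.dropWhile pvNS ++ ts
  | [] => by
    simp only [List.nil_append, List.dropWhile_nil]
    cases ts with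
    | nil => rfl
    | cons a b => rw [List.dropWhile_cons, hts a (by simp)]; simp
  | c :: t => by
    rw [List.cons_append, List.dropWhile_cons, List.dropWhile_cons]
    cases hp : pvNS c
    · simp
    · simp only [if_true]
      rw [pvDropWhile_append_fail ts hts t]

theorem pvW_append_ws (x ts : List Char) (hts : ∀ c ∈ ts, c = ' ') :
    pvW (x ++ ts) = pvW x := by
  have hts' : ∀ c ∈ ts, pvNS c = false := fun c hc => by simp [pvNS, hts c hc]
  induction x using pvW.induct with
  | case1 => simp only [List.nil_append, pvW_nil]; exact pvW_allsp ts hts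
  | case2 t ih => rw [List.cons_append, pvW_cons_sp, pvW_cons_sp, ih]
  | case3 c t hc ih =>
    rw [List.cons_append, pvW_cons c _ hc, pvW_cons c t hc]
    rw [pvTakeWhile_append_fail ts hts' t, pvDropWhile_append_fail ts hts' t]
    rw [ih]

theorem pvW_strip (v : List Char) : pvW ((((v.dropWhile (· == ' ')).reverse.dropWhile (· == ' '))).reverse) = pvW v := by
  conv_rhs => rw [← pvW_drop v]
  set v1 := v.dropWhile (· == ' ') with hv1
  have hdec : v1 = ((v1.reverse.dropWhile (· == ' '))).reverse ++ ((v1.reverse.takeWhile (· == ' '))).reverse := by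
    conv_lhs => rw [← List.reverse_reverse v1,
      ← List.takeWhile_append_dropWhile (p := (· == ' ')) (l := v1.reverse)]
    rw [List.reverse_append]
  conv_rhs => rw [hdec]
  rw [pvW_append_ws _ _ ?_]
  intro c hc
  rw [List.mem_reverse] at hc
  have := List.mem_takeWhile_imp hc
  simpa using this

theorem pvW_words : ∀ (v : List Char), ∀ w ∈ pvW v, w ≠ [] ∧ ∀ c ∈ w, c ≠ ' ' ∧ c ∈ v := by
  intro v
  induction v using pvW.induct with
  | case1 => simp [pvW_nil]
  | case2 t ih =>
    rw [pvW_cons_sp]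
    intro w hw
    obtain ⟨hne, hm⟩ := ih w hw
    exact ⟨hne, fun c hc => ⟨(hm c hc).1, by simp [(hm c hc).2]⟩⟩
  | case3 c t hc ih =>
    rw [pvW_cons c t hc]
    intro w hw
    rcases List.mem_cons.mp hw with rfl | hw'
    · refine ⟨by simp, ?_⟩
      intro x hx
      rcases List.mem_cons.mp hx with rfl | hx'
      · exact ⟨hc, by simp⟩
      · have h1 := List.mem_takeWhile_imp hx'
        have h2 : x ∈ t := (List.takeWhile_sublist _).mem hx'
        exact ⟨by simpa [pvNS] using h1, by simp [h2]⟩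
    · obtain ⟨hne, hm⟩ := ih w hw'
      refine ⟨hne, fun x hx => ⟨(hm x hx).1, ?_⟩⟩
      have := (hm x hx).2
      have h2 : x ∈ t := (List.dropWhile_sublist _).mem this
      simp [h2]

-- ---------- pvNC = join of words ----------

theorem pvNC_nil : pvNC [] = [] := by rw [pvNC]

theorem pvNC_cons_sp (t : List Char) : pvNC (' ' :: t) = ' ' :: pvNC (t.dropWhile (· == ' ')) := by
  rw [pvNC]; simp

theorem pvNC_cons (c : Char) (t : List Char) (hc : c ≠ ' ') : pvNC (c :: t) = c :: pvNC t := by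
  rw [pvNC]; simp [hc]

theorem pvNC_append_nonspace : ∀ (a s : List Char), (∀ c ∈ a, c ≠ ' ') →
    pvNC (a ++ s) = a ++ pvNC s
  | [], s, _ => by simp
  | c :: a, s, h => by
    rw [List.cons_append, pvNC_cons c _ (h c (by simp))]
    rw [pvNC_append_nonspace a s (fun x hx => h x (by simp [hx]))]
    rfl

theorem pvJoin_nil : PySem.Chars.join [' '] [] = [] := by
  simp [PySem.Chars.join, List.intercalate]

theorem pvJoin_singleton (w : List Char) : PySem.Chars.join [' '] [w] = w := by
  simp [PySem.Chars.join, List.intercalate]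

theorem pvJoin_cons_cons (a b : List Char) (t : List (List Char)) :
    PySem.Chars.join [' '] (a :: b :: t) = a ++ ' ' :: PySem.Chars.join [' '] (b :: t) := by
  simp [PySem.Chars.join, List.intercalate, List.intersperse]

theorem pvN3 (n : Nat) : ∀ (v : List Char), v.length ≤ n → v.head? ≠ some ' ' →
    v.getLast? ≠ some ' ' → pvNC v = PySem.Chars.join [' '] (pvW v) := by
  induction n with
  | zero =>
    intro v h _ _
    have : v = [] := by cases v <;> simp_all
    subst this
    rw [pvNC_nil, pvW_nil, pvJoin_nil]
  | succ n ih =>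
    intro v hlen hhead hlast
    match v with
    | [] => rw [pvNC_nil, pvW_nil, pvJoin_nil]
    | c :: t =>
      have hc : c ≠ ' ' := by rintro rfl; simp at hhead
      have ha : ∀ x ∈ t.takeWhile pvNS, x ≠ ' ' := by
        intro x hx
        have := List.mem_takeWhile_imp hx
        simpa [pvNS] using this
      rw [pvW_cons c t hc, pvNC_cons c t hc]
      conv_lhs => rw [← List.takeWhile_append_dropWhile (p := pvNS) (l := t)]
      rw [pvNC_append_nonspace _ _ ha]
      cases hs : t.dropWhile pvNS with
      | nil =>
        rw [pvNC_nil, pvW_nil, pvJoin_singleton]; simp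
      | cons d s' =>
        have hd : d = ' ' := by
          have := pvHead?_dropWhile (p := pvNS) t d (by rw [hs]; rfl)
          simpa [pvNS] using this
        subst hd
        rw [pvNC_cons_sp]
        set s'' := s'.dropWhile (· == ' ') with hs''
        -- the final character of v lives in s''
        have hlast' : (' ' :: s').getLast? ≠ some ' ' := by
          have hveq : (c :: t).getLast? = (' ' :: s').getLast? := by
            conv_lhs => rw [← List.takeWhile_append_dropWhile (p := pvNS) (l := t), hs]
            rw [show (c :: (List.takeWhile pvNS t ++ ' ' :: s')) = (c :: List.takeWhile pvNS t) ++ (' ' :: s') by simp]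
            exact pvGetLast?_append_right _ _ (by simp)
          rw [← hveq]; exact hlast
        have hs''ne : s'' ≠ [] := by
          intro hnil
          have hall : ∀ x ∈ s', x = ' ' := by
            intro x hx
            have := List.dropWhile_eq_nil_iff.mp hnil x hx
            simpa using this
          exact hlast' (pvGetLast?_allsp (' ' :: s') (by simp)
            (fun x hx => by rcases List.mem_cons.mp hx with rfl | hx' ; rfl; exact hall x hx'))
        have hs''head : s''.head? ≠ some ' ' := by
          intro hh
          have := pvHead?_dropWhile (p := (· == ' ')) s' ' ' hh
          simp at this
        have hs''last : s''.getLast? ≠ some ' ' := by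
          have hdecomp : s' = s'.takeWhile (· == ' ') ++ s'' :=
            (List.takeWhile_append_dropWhile).symm
          have h1 : (' ' :: s').getLast? = s''.getLast? := by
            conv_lhs => rw [hdecomp]
            rw [show (' ' :: (s'.takeWhile (· == ' ') ++ s'')) = (' ' :: s'.takeWhile (· == ' ')) ++ s'' by simp]
            exact pvGetLast?_append_right _ _ hs''ne
          rw [← h1]; exact hlast'
        have hs''len : s''.length ≤ n := by
          have h1 : s''.length ≤ s'.length := List.length_dropWhile_le _ _
          have h2 : (' ' :: s').length ≤ (t.dropWhile pvNS).length := by rw [hs]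
          have h3 := List.length_dropWhile_le pvNS t
          simp at hlen h2 ⊢
          omega
        rw [ih s'' hs''len hs''head hs''last]
        have hWs : pvW (' ' :: s') = pvW s'' := by
          rw [pvW_cons_sp, ← pvW_drop s']
        rw [hWs]
        cases hw : pvW s'' with
        | nil =>
          exfalso
          match hsx : s'', hs''ne, hs''head with
          | x :: xs, _, hh =>
            have hx : x ≠ ' ' := by simpa using hh
            rw [pvW_cons x xs hx] at hw
            simp at hw
        | cons w ws =>
          rw [pvJoin_cons_cons]
          simp

-- ---------- B side: the fold computes the words ----------

def pvWcur : List Char → List Char → List (List Char)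
  | cur, [] => if cur = [] then [] else [cur]
  | cur, c :: t =>
      if c ∈ pvSeps then (if cur = [] then pvWcur [] t else cur :: pvWcur [] t)
      else pvWcur (cur ++ [c]) t

def pvFin (st : List (List Char) × List Char) : List (List Char) :=
  if st.2 ≠ [] then st.1 ++ [st.2] else st.1

theorem pvFoldl_tok : ∀ (l : List Char) (toks : List (List Char)) (cur : List Char),
    pvFin (l.foldl pvStep (toks, cur)) = toks ++ pvWcur cur l
  | [], toks, cur => by
    by_cases hcur : cur = []
    · simp [pvFin, pvWcur, hcur]
    · simp [pvFin, pvWcur, hcur]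
  | c :: t, toks, cur => by
    rw [List.foldl_cons, pvWcur]
    by_cases hc : c ∈ pvSeps
    · rw [if_pos hc]
      rw [show pvStep (toks, cur) c = ((if cur ≠ [] then toks ++ [cur] else toks), []) by
        unfold pvStep; rw [if_pos hc]]
      rw [pvFoldl_tok t _ []]
      by_cases hcur : cur = []
      · simp [hcur]
      · simp [hcur]
    · rw [if_neg hc]
      rw [show pvStep (toks, cur) c = (toks, cur ++ [c]) by unfold pvStep; rw [if_neg hc]]
      exact pvFoldl_tok t toks (cur ++ [c])

theorem pvM_sp (c : Char) : (pvM c == ' ') = decide (c ∈ pvSeps) := by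
  by_cases h : c ∈ pvSeps
  · unfold pvM; rw [if_pos h]; simp [h]
  · unfold pvM; rw [if_neg h]
    have : c ≠ ' ' := fun hc => h (by rw [hc]; simp [pvSeps])
    simp [this, h]

theorem pvWcur_eq : ∀ (l : List Char) (cur : List Char), pvWcur cur l =
    if cur = [] then pvW (l.map pvM)
    else (cur ++ (l.map pvM).takeWhile pvNS) :: pvW ((l.map pvM).dropWhile pvNS)
  | [], cur => by
    by_cases hcur : cur = [] <;> simp [pvWcur, pvW_nil, hcur]
  | c :: t, cur => by
    rw [pvWcur]
    by_cases hc : c ∈ pvSeps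
    · have hm : pvM c = ' ' := by unfold pvM; rw [if_pos hc]
      rw [if_pos hc, List.map_cons, hm]
      by_cases hcur : cur = []
      · rw [if_pos hcur, if_pos hcur, pvWcur_eq t [], if_pos rfl, pvW_cons_sp]
      · rw [if_neg hcur, if_neg hcur, pvWcur_eq t [], if_pos rfl]
        have h1 : List.takeWhile pvNS (' ' :: List.map pvM t) = [] := by
          rw [List.takeWhile_cons]; simp [pvNS]
        have h2 : List.dropWhile pvNS (' ' :: List.map pvM t) = ' ' :: List.map pvM t := by
          rw [List.dropWhile_cons]; simp [pvNS]
        rw [h1, h2, pvW_cons_sp, List.append_nil]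
    · have hm : pvM c = c := by unfold pvM; rw [if_neg hc]
      have hcsp : c ≠ ' ' := fun h => hc (by rw [h]; simp [pvSeps])
      have hns : pvNS c = true := by simp [pvNS, hcsp]
      rw [if_neg hc, pvWcur_eq t (cur ++ [c]), if_neg (by simp)]
      rw [List.map_cons, hm]
      rw [List.takeWhile_cons, List.dropWhile_cons, hns]
      simp only [if_true]
      by_cases hcur : cur = []
      · rw [if_pos hcur, hcur, pvW_cons c _ hcsp]
        simp
      · rw [if_neg hcur]
        simp

-- ---------- Pre_ in terms of words ----------

theorem pvW_eq_nil_iff (v : List Char) : pvW v = [] ↔ ∀ c ∈ v, c = ' ' := by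
  induction v using pvW.induct with
  | case1 => simp [pvW_nil]
  | case2 t ih =>
    rw [pvW_cons_sp]
    constructor
    · intro h c hc
      rcases List.mem_cons.mp hc with rfl | hc'
      · rfl
      · exact (ih.mp h) c hc'
    · intro h
      exact ih.mpr (fun c hc => h c (List.mem_cons_of_mem _ hc))
  | case3 c t hc ih =>
    rw [pvW_cons c t hc]
    simp [hc]

theorem pvPre_iff (l : List Char) :
    ((((l.dropWhile (fun c => decide (c ∈ pvSeps))).dropWhile
        (fun c => decide (c ∉ pvSeps))).any (fun c => decide (c ∉ pvSeps))) = true)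
      ↔ 2 ≤ (pvW (l.map pvM)).length := by
  have e1 : (fun c => decide (c ∈ pvSeps)) = (fun c => c == ' ') ∘ pvM := by
    funext c; simp only [Function.comp]; rw [pvM_sp]
  have e2 : (fun c => decide (c ∉ pvSeps)) = pvNS ∘ pvM := by
    funext c; simp only [Function.comp, pvNS]; rw [pvM_sp]; simp
  rw [e1, e2]
  have hL : ((l.dropWhile ((fun c => c == ' ') ∘ pvM)).dropWhile (pvNS ∘ pvM)).any (pvNS ∘ pvM)
      = ((((l.map pvM).dropWhile (· == ' '))).dropWhile pvNS).any pvNS := by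
    rw [List.dropWhile_map, List.dropWhile_map, List.any_map]
  rw [hL]
  set u := l.map pvM with hu
  rw [← pvW_drop u]
  cases hu1 : u.dropWhile (· == ' ') with
  | nil => simp [pvW_nil]
  | cons c t =>
    have hc : c ≠ ' ' := by
      have := pvHead?_dropWhile (p := (· == ' ')) u c (by rw [hu1]; rfl)
      simpa using this
    rw [pvW_cons c t hc]
    rw [List.dropWhile_cons, if_pos (by simp [pvNS, hc])]
    simp only [List.length_cons, Nat.add_le_add_iff_right, Nat.succ_le_iff, List.length_pos_iff]
    rw [← pvW_drop (t.dropWhile pvNS)]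
    constructor
    · intro h
      have hgoal : pvW ((t.dropWhile pvNS).dropWhile (· == ' ')) ≠ [] → 1 < (pvW ((t.dropWhile pvNS).dropWhile (· == ' '))).length + 1 := by
        intro hne
        have := List.length_pos_iff.mpr hne
        omega
      refine hgoal ?_
      rw [ne_eq, pvW_eq_nil_iff]
      intro hall
      have h2 : ∀ x ∈ t.dropWhile pvNS, x = ' ' := by
        intro x hx
        have hxd : x ∈ (t.dropWhile pvNS).dropWhile (· == ' ') ∨ x = ' ' := by
          by_cases hxsp : x = ' '
          · exact Or.inr hxsp
          · left
            have hdecomp := List.takeWhile_append_dropWhile (p := (· == ' ')) (l := t.dropWhile pvNS)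
            rw [← hdecomp] at hx
            rcases List.mem_append.mp hx with h1 | h1
            · exact absurd (by simpa using List.mem_takeWhile_imp h1) hxsp
            · exact h1
        rcases hxd with h1 | h1
        · exact hall x h1
        · exact h1
      obtain ⟨x, hx, hns⟩ := List.any_eq_true.mp h
      rw [h2 x hx] at hns
      simp [pvNS] at hns
    · intro h
      have h' : pvW ((t.dropWhile pvNS).dropWhile (· == ' ')) ≠ [] := by
        intro hnil
        rw [hnil] at h
        simp at h
      rw [ne_eq, pvW_eq_nil_iff] at h'
      rw [List.any_eq_true]
      have : ¬ ∀ c ∈ (t.dropWhile pvNS).dropWhile (· == ' '), c = ' ' := h'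
      push_neg at this
      obtain ⟨x, hx, hxne⟩ := this
      have hxt : x ∈ t.dropWhile pvNS := (List.dropWhile_sublist _).mem hx
      exact ⟨x, hxt, by simp [pvNS, hxne]⟩

-- ---------- find and the final strip ----------

theorem pvFind_first (w0 r : List Char) (h : ∀ c ∈ w0, c ≠ ' ') :
    PySem.Chars.find (w0 ++ ' ' :: r) [' '] = (w0.length : Int) := by
  have hin : [' '] <:+: (w0 ++ ' ' :: r) := ⟨w0, r, by simp⟩
  have h0 : 0 ≤ PySem.Chars.find (w0 ++ ' ' :: r) [' '] := (PySem.Chars.find_nonneg_iff _ _).mpr hin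
  obtain ⟨hpre, hmin⟩ := PySem.Chars.find_spec h0
  set j := (PySem.Chars.find (w0 ++ ' ' :: r) [' ']).toNat with hj
  have hle : j ≤ w0.length := by
    by_contra hgt
    push_neg at hgt
    refine hmin w0.length hgt ⟨r, ?_⟩
    rw [List.drop_append_of_le_length le_rfl, List.drop_length, List.nil_append]
    rfl
  have hge : ¬ j < w0.length := by
    intro hlt
    obtain ⟨rest, hrest⟩ := hpre
    rw [List.drop_append_of_le_length (le_of_lt hlt)] at hrest
    have hhead : (w0.drop j ++ ' ' :: r).head? = some ' ' := by
      rw [← hrest]; rfl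
    have hhead2 : (w0.drop j).head? = some ' ' ∨ (w0.drop j) = [] := by
      cases hd : w0.drop j with
      | nil => exact Or.inr rfl
      | cons a b =>
        left
        rw [hd, List.cons_append] at hhead
        simp at hhead
        simp [hhead]
    rcases hhead2 with h1 | h1
    · rw [List.head?_drop] at h1
      have hmem : ' ' ∈ w0 := by
        have := List.getElem?_eq_some_iff.mp h1
        obtain ⟨hlt2, hEq⟩ := this
        exact hEq ▸ List.getElem_mem hlt2
      exact h ' ' hmem rfl
    · rw [List.drop_eq_nil_iff] at h1
      omega
  have : j = w0.length := by omega
  omega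

theorem pvHead?_ne_sp_dropWhile (x : List Char) (h : x.head? ≠ some ' ') :
    x.dropWhile (· == ' ') = x := by
  cases x with
  | nil => rfl
  | cons c t =>
    have : c ≠ ' ' := fun hc => h (by rw [hc]; rfl)
    rw [List.dropWhile_cons, if_neg (by simp [this])]

theorem pvTrim_head_last (v : List Char) :
    ((((v.dropWhile (· == ' ')).reverse.dropWhile (· == ' '))).reverse).head? ≠ some ' ' ∧
    ((((v.dropWhile (· == ' ')).reverse.dropWhile (· == ' '))).reverse).getLast? ≠ some ' ' := by
  set s1 := v.dropWhile (· == ' ') with hs1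
  set T := ((s1.reverse.dropWhile (· == ' '))).reverse with hT
  constructor
  · intro hh
    cases hT2 : T with
    | nil => rw [hT2] at hh; simp at hh
    | cons c t =>
      rw [hT2] at hh
      simp at hh
      subst hh
      -- s1 = T ++ spaces, so s1.head? = some ' ' ; but s1 is a dropWhile (· == ' ')
      have hdec : s1 = T ++ ((s1.reverse.takeWhile (· == ' '))).reverse := by
        rw [hT]
        conv_lhs => rw [← List.reverse_reverse s1,
          ← List.takeWhile_append_dropWhile (p := (· == ' ')) (l := s1.reverse)]
        rw [List.reverse_append]
      have hs1h : s1.head? = some ' ' := by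
        rw [hdec, hT2]
        rfl
      have := pvHead?_dropWhile (p := (· == ' ')) v ' ' hs1h
      simp at this
  · intro hh
    have h1 : T.reverse.head? = some ' ' := by
      rw [← List.getLast?_reverse, List.reverse_reverse]
      exact hh
    rw [hT, List.reverse_reverse] at h1
    have := pvHead?_dropWhile (p := (· == ' ')) s1.reverse ' ' h1
    simp at this

theorem pvJoin_ne_nil (w : List Char) (ws : List (List Char)) (hw : w ≠ []) :
    PySem.Chars.join [' '] (w :: ws) ≠ [] := by
  cases ws with
  | nil => rw [pvJoin_singleton]; exact hw
  | cons b t => rw [pvJoin_cons_cons]; simp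

theorem pvJoin_head? (w : List Char) (ws : List (List Char)) (hw : w ≠ []) :
    (PySem.Chars.join [' '] (w :: ws)).head? = w.head? := by
  cases ws with
  | nil => rw [pvJoin_singleton]
  | cons b t =>
    rw [pvJoin_cons_cons]
    cases w with
    | nil => exact absurd rfl hw
    | cons a t' => rfl

theorem pvJoin_getLast? : ∀ (ws : List (List Char)), (∀ w ∈ ws, w ≠ []) → ws ≠ [] →
    ∃ w ∈ ws, (PySem.Chars.join [' '] ws).getLast? = w.getLast?
  | [], _, hne => absurd rfl hne
  | [w], _, _ => ⟨w, by simp, by rw [pvJoin_singleton]⟩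
  | w :: b :: t, h, _ => by
    obtain ⟨w', hw', hEq⟩ := pvJoin_getLast? (b :: t) (fun x hx => h x (List.mem_cons_of_mem _ hx)) (by simp)
    refine ⟨w', List.mem_cons_of_mem _ hw', ?_⟩
    rw [pvJoin_cons_cons]
    rw [show w ++ ' ' :: PySem.Chars.join [' '] (b :: t) = (w ++ [' ']) ++ PySem.Chars.join [' '] (b :: t) by simp]
    rw [pvGetLast?_append_right _ _ (pvJoin_ne_nil b t (h b (by simp)))]
    exact hEq

theorem pvJoin_mem (c : Char) : ∀ (ws : List (List Char)), c ∈ PySem.Chars.join [' '] ws →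
    c = ' ' ∨ ∃ w ∈ ws, c ∈ w
  | [], h => by rw [pvJoin_nil] at h; simp at h
  | [w], h => by rw [pvJoin_singleton] at h; exact Or.inr ⟨w, by simp, h⟩
  | w :: b :: t, h => by
    rw [pvJoin_cons_cons] at h
    rcases List.mem_append.mp h with h1 | h1
    · exact Or.inr ⟨w, by simp, h1⟩
    · rcases List.mem_cons.mp h1 with rfl | h2
      · exact Or.inl rfl
      · rcases pvJoin_mem c (b :: t) h2 with h3 | ⟨w', hw', hc⟩
        · exact Or.inl h3
        · exact Or.inr ⟨w', List.mem_cons_of_mem _ hw', hc⟩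

-- ===== VERDICT (by name: the statement is the Claim_ definition above) =====
theorem function_implementation_spec : Claim_equal_function_implementation := by
  unfold Claim_equal_function_implementation
  intro ns proto hDom hPre
  unfold Spec_function_implementation
  have hDomL : ∀ c ∈ proto.toList, pvDomChar c = true := by
    unfold Dom_function_implementation pvDomStr at hDom
    simp only [Bool.and_eq_true, List.all_eq_true] at hDom
    exact fun c hc => hDom.2 c hc
  unfold Pre_function_implementation at hPre
  have h2 : 2 ≤ (pvW (proto.toList.map pvM)).length := (pvPre_iff proto.toList).mp hPre
  obtain ⟨w0, w1, ws', hW⟩ : ∃ w0 w1 ws', pvW (proto.toList.map pvM) = w0 :: w1 :: ws' := by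
    cases hW : pvW (proto.toList.map pvM) with
    | nil => rw [hW] at h2; simp at h2
    | cons a t =>
      cases t with
      | nil => rw [hW] at h2; simp at h2
      | cons b t' => exact ⟨a, b, t', rfl⟩
  have hsp : ∀ c ∈ proto.toList.map pvM, PySem.Chars.isspace c = (c == ' ') :=
    pvSP_map proto.toList hDomL
  have hws := pvW_words (proto.toList.map pvM)
  have hw0mem : w0 ∈ pvW (proto.toList.map pvM) := by rw [hW]; simp
  have hw0sp : ∀ c ∈ w0, c ≠ ' ' := fun c hc => ((hws w0 hw0mem).2 c hc).1
  have hw1mem : w1 ∈ pvW (proto.toList.map pvM) := by rw [hW]; simp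
  have hw1ne : w1 ≠ [] := (hws w1 hw1mem).1
  set r := PySem.Chars.join [' '] (w1 :: ws') with hr
  -- the collapsed, stripped prototype is  w0 ++ ' ' :: r
  have hp : pvCollapse (pvSeps.foldl
      (fun p k => PySem.Chars.strip (PySem.Chars.replace p [k] [' '])) proto.toList)
      = w0 ++ ' ' :: r := by
    rw [pvFold_eq_strip_map proto.toList]
    rw [pvStrip_sp _ hsp]
    rw [pvCollapse_eq_pvNC]
    have hT := pvTrim_head_last (proto.toList.map pvM)
    rw [pvN3 ((((((proto.toList.map pvM).dropWhile (· == ' '))).reverse.dropWhile (· == ' '))).reverse).length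
        _ le_rfl hT.1 hT.2]
    rw [pvW_strip (proto.toList.map pvM), hW, pvJoin_cons_cons]
  -- properties of r for the final strip
  have hspr : ∀ c ∈ (' ' :: r), PySem.Chars.isspace c = (c == ' ') := by
    intro c hc
    rcases List.mem_cons.mp hc with rfl | hc'
    · decide
    · rcases pvJoin_mem c (w1 :: ws') hc' with rfl | ⟨w, hwm, hcw⟩
      · decide
      · have hwin : w ∈ pvW (proto.toList.map pvM) := by
          rw [hW]; exact List.mem_cons_of_mem _ hwm
        exact hsp c ((hws w hwin).2 c hcw).2
  have hrhead : r.head? ≠ some ' ' := by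
    rw [hr, pvJoin_head? w1 ws' hw1ne]
    cases w1 with
    | nil => exact absurd rfl hw1ne
    | cons d t =>
      intro hh
      simp at hh
      exact ((hws (' ' :: t) (by rw [← hh]; exact hw1mem)).2 ' ' (by simp)).1 rfl
  have hrlast : r.getLast? ≠ some ' ' := by
    obtain ⟨w, hwm, hEq⟩ := pvJoin_getLast? (w1 :: ws')
      (fun x hx => (hws x (by rw [hW]; exact List.mem_cons_of_mem _ hx)).1) (by simp)
    rw [hr, hEq]
    intro hlast
    have hmem := List.mem_of_getLast? hlast
    have hwin : w ∈ pvW (proto.toList.map pvM) := by rw [hW]; exact List.mem_cons_of_mem _ hwm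
    exact ((hws w hwin).2 ' ' hmem).1 rfl
  have hstrip : PySem.Chars.strip (' ' :: r) = r := by
    rw [pvStrip_sp _ hspr]
    rw [show (' ' :: r).dropWhile (· == ' ') = r.dropWhile (· == ' ') by
      rw [List.dropWhile_cons]; simp]
    rw [pvHead?_ne_sp_dropWhile r hrhead]
    rw [pvHead?_ne_sp_dropWhile r.reverse (by rw [List.head?_reverse]; exact hrlast)]
    exact List.reverse_reverse r
  -- evaluate port A
  have hA : function_implementation ns proto
      = String.ofList (w0 ++ [' '] ++ ns.toList ++ [':', ':'] ++ r) := by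
    unfold function_implementation
    simp only [hp]
    rw [pvFind_first w0 r hw0sp]
    rw [if_neg (by omega)]
    rw [PySem.List.slice_to_natCast, PySem.List.slice_from_natCast]
    rw [List.take_left, List.drop_left]
    rw [hstrip]
  -- evaluate port B
  have hB : function_implementation_alt ns proto
      = String.ofList (w0 ++ ' ' :: (ns.toList ++ ':' :: ':' :: r)) := by
    unfold function_implementation_alt
    have htok : (if (proto.toList.foldl pvStep ([], [])).2 ≠ [] then
        (proto.toList.foldl pvStep ([], [])).1 ++ [(proto.toList.foldl pvStep ([], [])).2]
        else (proto.toList.foldl pvStep ([], [])).1) = w0 :: w1 :: ws' := by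
      have h1 : pvFin (proto.toList.foldl pvStep ([], [])) = w0 :: w1 :: ws' := by
        rw [pvFoldl_tok proto.toList [] [], pvWcur_eq proto.toList [], if_pos rfl]
        rw [List.nil_append, hW]
      exact h1
    simp only [htok]
    rfl
  rw [hA, hB]
  congr 1
  simp
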